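-- pv_equiv track=rewrite | github.com/pangpang-study/algorithm-coding-test-study | nyc/220613/programmers_양궁순위.py | backtrack
-- ===== SOURCE A (Python) =====
-- import copy
--
-- def get_score(ryan, a_peach):
--     score = 0
--     for i in range(11):
--         if ryan[i] > a_peach[i]:
--             score += (10 - i)
--         elif ryan[i] == a_peach[i] == 0:
--             continue
--         else:
--             score -= (10 - i)
--     return score
--
-- def backtrack(max_depth, depth, a_peach, ryan_cur, answer, score, start):
--     if depth == max_depth:
--         if (tmp := get_score(ryan_cur, a_peach)) > score:
--             score = tmp
--             answer = copy.deepcopy(ryan_cur)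
--         return answer, score
--
--     for i in range(10 - (10 - start), -1, -1):
--         ryan_cur[i] += 1
--         answer, score = backtrack(max_depth, depth + 1, a_peach, ryan_cur, answer, score, i)
--         ryan_cur[i] -= 1
--     return answer, score
-- ===== SOURCE B (Python) =====
-- def get_score(ryan, a_peach):
--     score = 0
--     for i in range(11):
--         if ryan[i] > a_peach[i]:
--             score += (10 - i)
--         elif ryan[i] == a_peach[i] == 0:
--             continue
--         else:
--             score -= (10 - i)
--     return score
--
-- def _cwr(r, pool):
--     # all length-r non-increasing selections from pool, in lexicographic pool order
--     if r <= 0: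
--         if r == 0:
--             yield []
--         return
--     if not pool:
--         return
--     for rest in _cwr(r - 1, pool):
--         yield [pool[0]] + rest
--     yield from _cwr(r, pool[1:])
--
-- def backtrack(max_depth, depth, a_peach, ryan_cur, answer, score, start):
--     remaining = max_depth - depth
--     for combo in _cwr(remaining, list(range(start, -1, -1))):
--         cur = list(ryan_cur)
--         for i in combo:
--             cur[i] += 1
--         tmp = get_score(cur, a_peach)
--         if tmp > score:
--             answer, score = cur, tmp
--     return answer, score
-- ===== Notes on version B (the rewrite author's own statement) =====
-- stated objective: alternative
-- what changed: Replaces the mutating depth-first recursion by a flat loop over an explicit generator of non-increasing index selections (combinations-with-replacement of range(start,-1,-1)), scoring a fresh list copy per candidate; same enumeration order and strict-> update, so the first-found tie-break is preserved.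
import Mathlib
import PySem

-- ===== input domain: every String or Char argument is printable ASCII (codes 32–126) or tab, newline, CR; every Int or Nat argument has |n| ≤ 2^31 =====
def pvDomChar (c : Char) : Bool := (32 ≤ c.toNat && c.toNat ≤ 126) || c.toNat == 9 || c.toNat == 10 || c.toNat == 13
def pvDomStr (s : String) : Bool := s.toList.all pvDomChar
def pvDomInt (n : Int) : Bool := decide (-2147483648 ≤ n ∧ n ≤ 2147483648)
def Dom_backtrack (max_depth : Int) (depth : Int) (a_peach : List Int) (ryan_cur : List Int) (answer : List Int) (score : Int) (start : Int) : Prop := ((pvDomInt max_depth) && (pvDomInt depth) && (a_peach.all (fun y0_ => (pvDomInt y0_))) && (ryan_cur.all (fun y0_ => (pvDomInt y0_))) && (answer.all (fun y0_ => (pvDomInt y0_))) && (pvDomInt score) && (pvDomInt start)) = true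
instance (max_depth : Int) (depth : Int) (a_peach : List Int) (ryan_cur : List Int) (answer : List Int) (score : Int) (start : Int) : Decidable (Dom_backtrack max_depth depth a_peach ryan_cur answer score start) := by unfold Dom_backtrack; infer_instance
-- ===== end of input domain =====

-- ===== PORT A =====
-- B changes the recursive DFS into a flat enumeration of arrow distributions; objective: alternative decomposition (same cost).
-- A restores ryan_cur before returning, so neither Python observably mutates its arguments.

-- shared helper of both Pythons: get_score (Python raises IndexError on lists shorter than 11;
-- pyGetD totalizes that — such inputs where it is reached lie outside Pre_backtrack)
def get_score (ryan : List Int) (a_peach : List Int) : Int :=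
  (PySem.List.pyRange 0 11 1).foldl (fun score i =>
    if PySem.List.pyGetD ryan i 0 > PySem.List.pyGetD a_peach i 0 then score + (10 - i)
    else if PySem.List.pyGetD ryan i 0 == PySem.List.pyGetD a_peach i 0 && PySem.List.pyGetD a_peach i 0 == 0 then score
    else score - (10 - i)) 0

-- xs[i] += d (Python raises IndexError out of range; pySetD/pyGetD totalize — outside Pre_backtrack)
def updAt (xs : List Int) (i : Int) (d : Int) : List Int :=
  PySem.List.pySetD xs i (PySem.List.pyGetD xs i 0 + d)

-- A's recursion with a fuel guard for totality: on Pre_ inputs depth ≤ max_depth, so the fuel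
-- (max_depth - depth).toNat + 1 never runs out (Python diverges when depth > max_depth and start ≥ 0).
def btA (fuel : Nat) (md : Int) (depth : Int) (peach : List Int) (ryan : List Int)
    (answer : List Int) (score : Int) (start : Int) : List Int × Int :=
  match fuel with
  | 0 => (answer, score)
  | fuel + 1 =>
    if depth = md then
      let tmp := get_score ryan peach
      if tmp > score then (ryan, tmp) else (answer, score)
    else
      let st := (PySem.List.pyRange start (-1) (-1)).foldl
        (fun (st : List Int × List Int × Int) i =>
          let ryan1 := updAt st.1 i 1
          let r := btA fuel md (depth + 1) peach ryan1 st.2.1 st.2.2 i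
          (updAt ryan1 i (-1), r.1, r.2)) (ryan, answer, score)
      (st.2.1, st.2.2)

def backtrack (max_depth : Int) (depth : Int) (a_peach : List Int) (ryan_cur : List Int) (answer : List Int) (score : Int) (start : Int) : List Int × Int :=
  btA ((max_depth - depth).toNat + 1) max_depth depth a_peach ryan_cur answer score start

-- ===== PORT B =====
-- Source B's _cwr generator: all length-r non-increasing selections from pool, lexicographic pool order
def cwr (r : Int) (pool : List Int) : List (List Int) :=
  if r ≤ 0 then (if r = 0 then [[]] else [])
  else match pool with
    | [] => []
    | x :: xs => (cwr (r - 1) (x :: xs)).map (fun c => x :: c) ++ cwr r xs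
  termination_by (r.toNat, pool.length)
  decreasing_by
  · exact Prod.Lex.left _ _ (by omega)
  · exact Prod.Lex.right _ (by simp)

-- cur = list(ryan_cur); for i in combo: cur[i] += 1
def applyIncr (ryan : List Int) (combo : List Int) : List Int :=
  combo.foldl (fun c i => updAt c i 1) ryan

def backtrack_alt (max_depth : Int) (depth : Int) (a_peach : List Int) (ryan_cur : List Int) (answer : List Int) (score : Int) (start : Int) : List Int × Int :=
  (cwr (max_depth - depth) (PySem.List.pyRange start (-1) (-1))).foldl
    (fun (acc : List Int × Int) combo =>
      let cur := applyIncr ryan_cur combo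
      let tmp := get_score cur a_peach
      if tmp > acc.2 then (cur, tmp) else acc) (answer, score)

-- ===== PRECONDITION & SPEC =====
-- Pre_ excludes exactly the inputs where A raises: IndexError (lists shorter than 11 when a leaf is
-- scored, or start ≥ len(ryan_cur) when the loop runs) or RecursionError (depth > max_depth with start ≥ 0).
def Pre_backtrack (max_depth : Int) (depth : Int) (a_peach : List Int) (ryan_cur : List Int) (answer : List Int) (score : Int) (start : Int) : Prop :=
  (depth ≠ max_depth ∧ start < 0) ∨
  (depth ≤ max_depth ∧ 11 ≤ a_peach.length ∧ 11 ≤ ryan_cur.length ∧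
    (depth = max_depth ∨ (0 ≤ start ∧ start < (ryan_cur.length : Int))))
instance (max_depth : Int) (depth : Int) (a_peach : List Int) (ryan_cur : List Int) (answer : List Int) (score : Int) (start : Int) : Decidable (Pre_backtrack max_depth depth a_peach ryan_cur answer score start) := by unfold Pre_backtrack; infer_instance

def pvWitness_backtrack : Int × Int × List Int × List Int × List Int × Int × Int :=
  (1, 0, [1,0,0,0,0,0,0,0,0,0,0], [0,0,0,0,0,0,0,0,0,0,0], [], 0, 2)

def Spec_backtrack (max_depth : Int) (depth : Int) (a_peach : List Int) (ryan_cur : List Int) (answer : List Int) (score : Int) (start : Int) (out : List Int × Int) : Prop := out = backtrack_alt max_depth depth a_peach ryan_cur answer score start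
instance (max_depth : Int) (depth : Int) (a_peach : List Int) (ryan_cur : List Int) (answer : List Int) (score : Int) (start : Int) (out : List Int × Int) : Decidable (Spec_backtrack max_depth depth a_peach ryan_cur answer score start out) := by unfold Spec_backtrack; infer_instance

-- ===== CLAIM (what is proved, stated in full; the proofs are below) =====
def Claim_equal_backtrack : Prop := ∀ (max_depth : Int) (depth : Int) (a_peach : List Int) (ryan_cur : List Int) (answer : List Int) (score : Int) (start : Int), Dom_backtrack max_depth depth a_peach ryan_cur answer score start → Pre_backtrack max_depth depth a_peach ryan_cur answer score start → Spec_backtrack max_depth depth a_peach ryan_cur answer score start (backtrack max_depth depth a_peach ryan_cur answer score start)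

-- ===== LEMMAS AND PROOFS =====

-- restoring an incremented cell gives the list back
lemma updAt_restore (xs : List Int) (i : Int) (hi : 0 ≤ i) : updAt (updAt xs i 1) i (-1) = xs := by
  unfold updAt
  obtain ⟨n, rfl⟩ : ∃ n : Nat, i = (n : Int) := ⟨i.toNat, by omega⟩
  simp only [PySem.List.pyGetD_natCast, PySem.List.pySetD_natCast]
  by_cases h : n < xs.length
  · simp [List.getD, h, List.set_set]
  · simp [List.set_eq_of_length_le (by omega : xs.length ≤ n)]

-- B's fold, as a function (proof-only helper)
def bfold (peach ryan : List Int) (n : Nat) (pool : List Int) (answer : List Int) (score : Int) : List Int × Int :=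
  (cwr (n : Int) pool).foldl
    (fun (acc : List Int × Int) combo =>
      let cur := applyIncr ryan combo
      let tmp := get_score cur peach
      if tmp > acc.2 then (cur, tmp) else acc) (answer, score)

lemma bfold_cons (peach ryan : List Int) (n : Nat) (s : Int) (hs : 0 ≤ s) (answer : List Int) (score : Int) :
    bfold peach ryan (n+1) (PySem.List.pyRange s (-1) (-1)) answer score =
      bfold peach ryan (n+1) (PySem.List.pyRange (s-1) (-1) (-1))
        (bfold peach (updAt ryan s 1) n (PySem.List.pyRange s (-1) (-1)) answer score).1
        (bfold peach (updAt ryan s 1) n (PySem.List.pyRange s (-1) (-1)) answer score).2 := by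
  conv_lhs => rw [PySem.List.pyRange_neg_one_cons (by omega : (-1:Int) < s)]
  conv_rhs => rw [show PySem.List.pyRange s (-1) (-1) = s :: PySem.List.pyRange (s-1) (-1) (-1) from
    PySem.List.pyRange_neg_one_cons (by omega : (-1:Int) < s)]
  unfold bfold
  push_cast
  rw [show cwr ((n:Int)+1) (s :: PySem.List.pyRange (s-1) (-1) (-1)) =
      (cwr (n:Int) (s :: PySem.List.pyRange (s-1) (-1) (-1))).map (fun c => s :: c) ++
        cwr ((n:Int)+1) (PySem.List.pyRange (s-1) (-1) (-1)) from by
    rw [cwr]; simp]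
  rw [List.foldl_append, List.foldl_map]
  rfl

lemma loop_eq (n f : Nat) (hnf : n < f) (md depth : Int) (hmd : md - (depth + 1) = (n : Int))
    (peach : List Int)
    (IH : ∀ (fuel : Nat), n < fuel → ∀ (md depth : Int), md - depth = (n : Int) →
      ∀ (peach ryan answer : List Int) (score start : Int),
      btA fuel md depth peach ryan answer score start =
        bfold peach ryan n (PySem.List.pyRange start (-1) (-1)) answer score) :
    ∀ (m : Nat) (s : Int), (s + 1).toNat = m → ∀ (ryan answer : List Int) (score : Int),
    (PySem.List.pyRange s (-1) (-1)).foldl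
      (fun (st : List Int × List Int × Int) i =>
        let ryan1 := updAt st.1 i 1
        let r := btA f md (depth + 1) peach ryan1 st.2.1 st.2.2 i
        (updAt ryan1 i (-1), r.1, r.2)) (ryan, answer, score)
    = (ryan, bfold peach ryan (n+1) (PySem.List.pyRange s (-1) (-1)) answer score) := by
  intro m
  induction m with
  | zero =>
    intro s hs ryan answer score
    have : s ≤ -1 := by omega
    rw [PySem.List.pyRange_neg_one_eq_nil this]
    unfold bfold
    rw [cwr.eq_def]
    have hnn : ¬((n : Int) + 1 ≤ 0) := by omega
    simp [hnn]
  | succ m ihm =>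
    intro s hs ryan answer score
    have hs0 : 0 ≤ s := by omega
    rw [bfold_cons peach ryan n s hs0 answer score]
    conv_lhs => rw [PySem.List.pyRange_neg_one_cons (by omega : (-1:Int) < s)]
    rw [List.foldl_cons]
    simp only []
    rw [IH f hnf md (depth + 1) hmd peach (updAt ryan s 1) answer score s]
    rw [updAt_restore ryan s hs0]
    rw [ihm (s - 1) (by omega) ryan _ _]

lemma btA_eq : ∀ (n : Nat) (fuel : Nat), n < fuel → ∀ (md depth : Int), md - depth = (n : Int) →
    ∀ (peach ryan answer : List Int) (score start : Int),
    btA fuel md depth peach ryan answer score start =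
      bfold peach ryan n (PySem.List.pyRange start (-1) (-1)) answer score := by
  intro n
  induction n with
  | zero =>
    intro fuel hf md depth hmd peach ryan answer score start
    obtain ⟨f, rfl⟩ : ∃ f, fuel = f + 1 := ⟨fuel - 1, by omega⟩
    have hd : depth = md := by omega
    rw [show bfold peach ryan 0 (PySem.List.pyRange start (-1) (-1)) answer score =
        (if get_score ryan peach > score then (ryan, get_score ryan peach) else (answer, score)) from by
      unfold bfold; rw [cwr.eq_def]; simp [applyIncr]]
    simp [btA, hd]
  | succ n ih =>
    intro fuel hf md depth hmd peach ryan answer score start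
    obtain ⟨f, rfl⟩ : ∃ f, fuel = f + 1 := ⟨fuel - 1, by omega⟩
    have hd : ¬ (depth = md) := by omega
    simp only [btA, hd, if_false]
    rw [loop_eq n f (by omega) md depth (by omega) peach ih (start + 1).toNat start rfl ryan answer score]

-- ===== VERDICT (by name: the statement is the Claim_ definition above) =====
theorem backtrack_spec : Claim_equal_backtrack := by
  intro md depth peach ryan answer score start _ hpre
  unfold Spec_backtrack backtrack backtrack_alt
  by_cases hle : depth ≤ md
  · have hn : md - depth = ((md - depth).toNat : Int) := by omega
    rw [btA_eq (md - depth).toNat ((md - depth).toNat + 1) (by omega) md depth hn, hn]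
    rfl
  · -- depth > max_depth with start < 0: A's loop is empty, B has no selections of negative length
    have hst : start < 0 := by
      rcases hpre with ⟨_, h⟩ | ⟨h, _⟩
      · exact h
      · omega
    rw [show (md - depth).toNat = 0 from by omega,
        PySem.List.pyRange_neg_one_eq_nil (by omega : start ≤ (-1:Int)), cwr.eq_def]
    simp [btA, show ¬(depth = md) from by omega, show md - depth ≤ 0 from by omega,
      show ¬(md - depth = 0) from by omega,
      PySem.List.pyRange_neg_one_eq_nil (show start ≤ (-1:Int) from by omega)]
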